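-- pv_equiv track=rewrite | github.com/henryhardigan/contact-alignment | src/mj_align/dynamic_programming.py | proline_run_mask
-- ===== SOURCE A (Python) =====
-- def proline_run_mask(seq: str) -> list[bool]:
--     """Create a mask for positions in proline runs of length >= 2.
--
--     Identifies consecutive proline (P) residues that form runs,
--     which may have special structural significance.
--
--     Args:
--         seq: Protein sequence.
--
--     Returns:
--         List of booleans where True indicates position is part
--         of a PP+ run.
--
--     Example:
--         >>> proline_run_mask("ACPPDEF")
--         [False, False, True, True, False, False, False]
--     """
--     s = seq.strip().upper()
--     mask = [False] * len(s)
--     i = 0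
--     while i < len(s):
--         if s[i] != "P":
--             i += 1
--             continue
--         j = i + 1
--         while j < len(s) and s[j] == "P":
--             j += 1
--         if j - i >= 2:  # Run of length >= 2
--             for k in range(i, j):
--                 mask[k] = True
--         i = j
--     return mask
-- ===== SOURCE B (Python) =====
-- def proline_run_mask(seq: str) -> list[bool]:
--     s = seq.strip().upper()
--     n = len(s)
--     return [
--         s[i] == "P"
--         and ((i > 0 and s[i - 1] == "P") or (i + 1 < n and s[i + 1] == "P"))
--         for i in range(n)
--     ]
-- ===== Notes on version B (the rewrite author's own statement) =====
-- stated objective: simpler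
-- what changed: Replaces A's two-pointer run-detection scan with in-place mask mutation by a single list comprehension marking each position independently via a neighbor test (P with an adjacent P).
import Mathlib
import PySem

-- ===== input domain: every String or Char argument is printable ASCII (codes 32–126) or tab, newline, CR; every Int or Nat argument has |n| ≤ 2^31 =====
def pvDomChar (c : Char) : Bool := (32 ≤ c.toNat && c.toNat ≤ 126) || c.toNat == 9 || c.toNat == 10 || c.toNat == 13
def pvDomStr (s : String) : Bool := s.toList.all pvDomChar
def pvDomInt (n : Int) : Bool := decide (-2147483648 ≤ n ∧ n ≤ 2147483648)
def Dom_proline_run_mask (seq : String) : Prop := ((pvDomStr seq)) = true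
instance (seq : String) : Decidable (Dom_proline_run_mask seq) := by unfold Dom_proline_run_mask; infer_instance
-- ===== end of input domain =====

-- B replaces A's two-pointer run-detection scan (with in-place mask mutation) by an
-- independent per-position neighbor test expressed as a single comprehension (objective: simpler).

-- ===== PORT A =====
-- inner 'while j < len(s) and s[j] == "P": j += 1'
def pvScanP (s : List Char) (j : Nat) : Nat :=
  if h : j < s.length then
    if s[j] = 'P' then pvScanP s (j + 1) else j
  else j
termination_by s.length - j

-- pvScanP never decreases its argument (used for the outer loop's termination)
theorem pvScanP_ge (s : List Char) (j : Nat) : j ≤ pvScanP s j := by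
  unfold pvScanP
  split
  · split
    · exact Nat.le_trans (Nat.le_succ j) (pvScanP_ge s (j + 1))
    · exact Nat.le_refl j
  · exact Nat.le_refl j
termination_by s.length - j

-- outer 'while i < len(s): …'; 'for k in range(i, j): mask[k] = True' is the foldl
def pvRunLoop (s : List Char) (mask : List Bool) (i : Nat) : List Bool :=
  if h : i < s.length then
    if s[i] ≠ 'P' then pvRunLoop s mask (i + 1)
    else
      if pvScanP s (i + 1) - i ≥ 2 then
        pvRunLoop s ((List.range' i (pvScanP s (i + 1) - i)).foldl (fun m k => m.set k true) mask)
          (pvScanP s (i + 1))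
      else pvRunLoop s mask (pvScanP s (i + 1))
  else mask
termination_by s.length - i
decreasing_by
  · omega
  · have := pvScanP_ge s (i + 1); omega
  · have := pvScanP_ge s (i + 1); omega

def proline_run_mask (seq : String) : List Bool :=
  let s := (PySem.Str.upper (PySem.Str.strip seq)).toList
  pvRunLoop s (List.replicate s.length false) 0

-- ===== PORT B =====
-- the comprehension's per-position test: s[i]=='P' and ((i>0 and s[i-1]=='P') or (i+1<n and s[i+1]=='P'))
def pvNbrBit (s : List Char) (i : Nat) : Bool :=
  decide (s.getD i ' ' = 'P') &&
    ((decide (0 < i) && decide (s.getD (i - 1) ' ' = 'P')) ||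
     (decide (i + 1 < s.length) && decide (s.getD (i + 1) ' ' = 'P')))

def proline_run_mask_alt (seq : String) : List Bool :=
  let s := (PySem.Str.upper (PySem.Str.strip seq)).toList
  (List.range s.length).map (pvNbrBit s)

-- ===== PRECONDITION & SPEC =====
def Spec_proline_run_mask (seq : String) (out : List Bool) : Prop := out = proline_run_mask_alt seq
instance (seq : String) (out : List Bool) : Decidable (Spec_proline_run_mask seq out) := by unfold Spec_proline_run_mask; infer_instance

-- ===== CLAIM (what is proved, stated in full; the proofs are below) =====
def Claim_equal_proline_run_mask : Prop := ∀ (seq : String), Dom_proline_run_mask seq → Spec_proline_run_mask seq (proline_run_mask seq)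

-- ===== LEMMAS AND PROOFS =====

theorem pvScanP_le (s : List Char) (j : Nat) (hj : j ≤ s.length) : pvScanP s j ≤ s.length := by
  unfold pvScanP
  split
  · split
    · exact pvScanP_le s (j + 1) (by omega)
    · exact hj
  · exact hj
termination_by s.length - j

theorem pvScanP_mem (s : List Char) (j : Nat) :
    ∀ k, j ≤ k → k < pvScanP s j → k < s.length ∧ s.getD k ' ' = 'P' := by
  intro k hk1 hk2
  rw [pvScanP] at hk2
  split at hk2
  · next h =>
    split at hk2
    · next hP =>
      rcases Nat.eq_or_lt_of_le hk1 with rfl | hlt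
      · exact ⟨h, by rw [List.getD_eq_getElem s ' ' h]; exact hP⟩
      · exact pvScanP_mem s (j + 1) k hlt hk2
    · omega
  · omega
termination_by s.length - j

theorem pvScanP_stop (s : List Char) (j : Nat) :
    pvScanP s j = s.length ∨ s.length ≤ j ∨ s.getD (pvScanP s j) ' ' ≠ 'P' := by
  rw [pvScanP]
  split
  · next h =>
    split
    · next hP =>
      rcases pvScanP_stop s (j + 1) with h1 | h1 | h1
      · exact Or.inl h1
      · -- j+1 ≥ length together with j < length forces pvScanP s (j+1) = j+1 = length
        left
        rw [pvScanP]
        have hnl : ¬ (j + 1 < s.length) := by omega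
        rw [dif_neg hnl]; omega
      · exact Or.inr (Or.inr h1)
    · next hP =>
        exact Or.inr (Or.inr (by rw [List.getD_eq_getElem s ' ' h]; exact hP))
  · omega
termination_by s.length - j

theorem pvFoldlSet_length (m : Nat) : ∀ (i : Nat) (mask : List Bool),
    ((List.range' i m).foldl (fun a k => a.set k true) mask).length = mask.length := by
  induction m with
  | zero => intro i mask; simp
  | succ m ih =>
      intro i mask
      rw [List.range'_succ]
      simp only [List.foldl_cons]
      rw [ih]
      simp

theorem pvFoldlSet_getD (m : Nat) : ∀ (i : Nat) (mask : List Bool), i + m ≤ mask.length →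
    ∀ k, ((List.range' i m).foldl (fun a k => a.set k true) mask).getD k false =
      if i ≤ k ∧ k < i + m then true else mask.getD k false := by
  induction m with
  | zero => intro i mask _ k; simp
  | succ m ih =>
      intro i mask hlen k
      rw [List.range'_succ]
      simp only [List.foldl_cons]
      rw [ih (i + 1) (mask.set i true) (by simp; omega) k]
      by_cases hik : i + 1 ≤ k ∧ k < i + 1 + m
      · rw [if_pos hik, if_pos (by omega)]
      · rw [if_neg hik]
        simp only [List.getD, List.getElem?_set]
        by_cases hki : i = k
        · subst hki
          have hi : i < mask.length := by omega
          rw [if_pos rfl, if_pos hi, if_pos (by omega)]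
          rfl
        · rw [if_neg hki, if_neg (by omega)]

-- the neighbor test is true at every position of a run of length ≥ 2
theorem pvNbrBit_run (s : List Char) (i j k : Nat) (hij : 2 ≤ j - i) (hjlen : j ≤ s.length)
    (hrun : ∀ m, i ≤ m → m < j → s.getD m ' ' = 'P') (hk1 : i ≤ k) (hk2 : k < j) :
    pvNbrBit s k = true := by
  unfold pvNbrBit
  simp only [Bool.and_eq_true, Bool.or_eq_true, decide_eq_true_eq]
  refine ⟨hrun k hk1 hk2, ?_⟩
  by_cases hki : k = i
  · exact Or.inr ⟨by omega, hrun (k + 1) (by omega) (by omega)⟩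
  · exact Or.inl ⟨by omega, hrun (k - 1) (by omega) (by omega)⟩

-- main invariant lemma for A's outer loop
theorem pvRunLoop_eq (s : List Char) (i : Nat) (mask : List Bool)
    (hlen : mask.length = s.length)
    (hlow : ∀ k, k < i → mask.getD k false = pvNbrBit s k)
    (hhigh : ∀ k, i ≤ k → mask.getD k false = false)
    (hinv : s.length ≤ i ∨ i = 0 ∨ s.getD (i - 1) ' ' ≠ 'P' ∨ s.getD i ' ' ≠ 'P') :
    pvRunLoop s mask i = (List.range s.length).map (pvNbrBit s) := by
  rw [pvRunLoop]
  split
  · next h =>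
    split
    · next hP =>
      -- s[i] ≠ 'P'
      have hPi : s.getD i ' ' ≠ 'P' := by rw [List.getD_eq_getElem s ' ' h]; exact hP
      refine pvRunLoop_eq s (i + 1) mask hlen ?_ (fun k hk => hhigh k (by omega)) ?_
      · intro k hk
        rcases Nat.lt_or_ge k i with hki | hki
        · exact hlow k hki
        · have : k = i := by omega
          subst this
          rw [hhigh k (le_refl k)]
          have hb : pvNbrBit s k = false := by
            unfold pvNbrBit
            rw [decide_eq_false hPi]
            simp
          rw [hb]
      · right; right; left; simpa using hPi
    · next hP =>
      have hPi : s.getD i ' ' = 'P' := by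
        rw [List.getD_eq_getElem s ' ' h]
        exact not_not.mp hP
      have hge := pvScanP_ge s (i + 1)
      have hle := pvScanP_le s (i + 1) (by omega)
      have hstop := pvScanP_stop s (i + 1)
      set j := pvScanP s (i + 1) with hj
      have hrun : ∀ m, i ≤ m → m < j → s.getD m ' ' = 'P' := by
        intro m hm1 hm2
        rcases Nat.eq_or_lt_of_le hm1 with rfl | hlt
        · exact hPi
        · exact (pvScanP_mem s (i + 1) m hlt hm2).2
      split
      · next h2 =>
        -- run of length ≥ 2, mask[i:j] := True
        refine pvRunLoop_eq s j _ (by rw [pvFoldlSet_length]; exact hlen) ?_ ?_ ?_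
        · intro k hk
          rw [pvFoldlSet_getD (j - i) i mask (by omega) k]
          by_cases hik : i ≤ k ∧ k < i + (j - i)
          · rw [if_pos hik]
            exact (pvNbrBit_run s i j k h2 hle hrun hik.1 (by omega)).symm
          · rw [if_neg hik]
            exact hlow k (by omega)
        · intro k hk
          rw [pvFoldlSet_getD (j - i) i mask (by omega) k]
          rw [if_neg (by omega)]
          exact hhigh k (by omega)
        · rcases hstop with h1 | h1 | h1
          · left; omega
          · left; omega
          · right; right; right; exact h1
      · next h2 =>
        -- singleton 'P' at i: j = i + 1, no write
        have hji : j = i + 1 := by omega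
        refine pvRunLoop_eq s j mask hlen ?_ (fun k hk => hhigh k (by omega)) ?_
        · intro k hk
          rcases Nat.lt_or_ge k i with hki | hki
          · exact hlow k hki
          · have : k = i := by omega
            subst this
            rw [hhigh k (le_refl k)]
            have hleft : ¬ (0 < k ∧ s.getD (k - 1) ' ' = 'P') := by
              rcases hinv with h1 | h1 | h1 | h1
              · omega
              · omega
              · intro hc; exact h1 hc.2
              · exact absurd hPi h1
            have hright : ¬ (k + 1 < s.length ∧ s.getD (k + 1) ' ' = 'P') := by
              rcases hstop with h1 | h1 | h1
              · intro hc; omega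
              · omega
              · intro hc; rw [hji] at h1; exact h1 hc.2
            have hb : pvNbrBit s k = false := by
              unfold pvNbrBit
              simp only [Bool.and_eq_false_iff, Bool.or_eq_false_iff,
                decide_eq_false_iff_not]
              tauto
            rw [hb]
        · rcases hstop with h1 | h1 | h1
          · left; omega
          · left; omega
          · right; right; right; rw [hji] at h1 ⊢; exact h1
  · next h =>
    -- i ≥ len(s): mask is final
    apply List.ext_getElem
    · simp [hlen]
    · intro k hk1 hk2
      have hks : k < s.length := by simpa [hlen] using hk1
      have := hlow k (by omega)
      rw [List.getD_eq_getElem mask false hk1] at this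
      simp [this]
termination_by s.length - i
decreasing_by
  · omega
  · have := pvScanP_ge s (i + 1); omega
  · have := pvScanP_ge s (i + 1); omega

-- ===== VERDICT (by name: the statement is the Claim_ definition above) =====
theorem proline_run_mask_spec : Claim_equal_proline_run_mask := by
  intro seq _
  unfold Spec_proline_run_mask proline_run_mask proline_run_mask_alt
  refine pvRunLoop_eq _ 0 _ (by simp) ?_ ?_ ?_
  · intro k hk; omega
  · intro k _; simp [List.getD]
  · right; left; rfl
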